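-- pv_equiv track=rewrite | github.com/eribeiro9/PyProjectEuler | math_util/General.py | max_product_of
-- ===== SOURCE A (Python) =====
-- def max_product_of(data, length):
--     max_product = 1
--     data_length = len(data[0])
--     data_height = len(data)
--     for col in range(data_length):
--         for row in range(data_height):
--             products = [1, 1, 1, 1]
--             if col <= data_length - length:
--                 for i in range(length):
--                     products[0] *= data[row][col + i]
--             if row <= data_height - length:
--                 for i in range(length):
--                     products[1] *= data[row + i][col]
--             if col <= data_length - length and row >= length - 1:
--                 for i in range(length):
--                     products[2] *= data[row - i][col + i]
--             if col <= data_length - length and row <= data_height - length: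
--                 for i in range(length):
--                     products[3] *= data[row + i][col + i]
--             max_product = max(max_product, max(products))
--     return max_product
-- ===== SOURCE B (Python) =====
-- def max_product_of(data, length):
--     h = len(data)
--     w = len(data[0])
--     if length <= 0:
--         return 1   # an empty window's product is 1
--
--     # materialise every line of the grid (rows, columns, the two diagonal families)
--     lines = []
--     for r in range(h):
--         lines.append([data[r][c] for c in range(w)])
--     for c in range(w):
--         lines.append([data[r][c] for r in range(h)])
--     for d in range(-(h - 1), w):                      # down-right diagonals: c - r == d
--         lines.append([data[r][r + d] for r in range(h) if 0 <= r + d < w])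
--     for s in range(h + w - 1):                        # up-right diagonals: r + c == s
--         lines.append([data[r][s - r] for r in range(h) if 0 <= s - r < w])
--
--     # one generic 1-D sliding-window maximum-product pass over every line
--     best = 1
--     for line in lines:
--         for i in range(len(line) - length + 1):
--             p = 1
--             for j in range(i, i + length):
--                 p *= line[j]
--             best = max(best, p)
--     return best
-- ===== Notes on version B (the rewrite author's own statement) =====
-- stated objective: alternative
-- what changed: B materialises every grid line (rows, columns, both diagonal families) as an explicit list once and runs a single generic 1-D sliding-window product pass over each line, instead of A's per-cell scan that computes four guarded directional products at every cell.
-- outside the precondition, e.g. on max_product_of([[1, 2], [3]], 5): A returns 1, B raises IndexError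
import Mathlib
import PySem

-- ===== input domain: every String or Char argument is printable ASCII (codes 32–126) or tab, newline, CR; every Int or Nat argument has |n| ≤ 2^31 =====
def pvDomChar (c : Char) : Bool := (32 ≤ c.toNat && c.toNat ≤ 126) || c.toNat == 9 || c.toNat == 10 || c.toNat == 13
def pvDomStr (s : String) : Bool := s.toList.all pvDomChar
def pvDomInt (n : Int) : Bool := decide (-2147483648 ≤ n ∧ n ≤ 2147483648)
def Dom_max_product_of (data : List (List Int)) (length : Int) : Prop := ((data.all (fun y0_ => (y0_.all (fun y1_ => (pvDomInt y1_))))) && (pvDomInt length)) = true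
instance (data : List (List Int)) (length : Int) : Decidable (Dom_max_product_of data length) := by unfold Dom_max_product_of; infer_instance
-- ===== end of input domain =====

-- B extracts every grid line (rows, columns, both diagonal families) as a list and runs one
-- generic 1-D sliding-window product pass over each line, instead of A's per-cell scan with
-- four guarded directional products; a different decomposition of the same search, same cost.

-- ===== PORT A =====
-- len(data[0]); Pre_ guarantees data ≠ [] so the getD default is never taken
def pvWl (data : List (List Int)) : Int := (((PySem.List.pyGet? data 0).getD []).length : Int)
-- data[r][c]; Pre_ guarantees every access is in range, so the getD defaults are never taken
def pvCell (data : List (List Int)) (r c : Int) : Int :=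
  (PySem.List.pyGet? ((PySem.List.pyGet? data r).getD []) c).getD 0

def max_product_of (data : List (List Int)) (length : Int) : Int :=
  let data_length : Int := pvWl data
  let data_height : Int := (data.length : Int)
  (PySem.List.pyRange 0 data_length 1).foldl (fun mp col =>
    (PySem.List.pyRange 0 data_height 1).foldl (fun mp row =>
      let p0 : Int := if col ≤ data_length - length then
          (PySem.List.pyRange 0 length 1).foldl (fun p i => p * pvCell data row (col + i)) 1 else 1
      let p1 : Int := if row ≤ data_height - length then
          (PySem.List.pyRange 0 length 1).foldl (fun p i => p * pvCell data (row + i) col) 1 else 1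
      let p2 : Int := if col ≤ data_length - length ∧ length - 1 ≤ row then
          (PySem.List.pyRange 0 length 1).foldl (fun p i => p * pvCell data (row - i) (col + i)) 1 else 1
      let p3 : Int := if col ≤ data_length - length ∧ row ≤ data_height - length then
          (PySem.List.pyRange 0 length 1).foldl (fun p i => p * pvCell data (row + i) (col + i)) 1 else 1
      max mp (max (max (max p0 p1) p2) p3)) mp) 1

-- ===== PORT B =====
def max_product_of_alt (data : List (List Int)) (length : Int) : Int :=
  let h : Int := (data.length : Int)
  let w : Int := pvWl data
  if length ≤ 0 then 1 else
  -- lines: rows, columns, down-right diagonals (c - r = d), up-right diagonals (r + c = s)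
  let lines : List (List Int) :=
    ((PySem.List.pyRange 0 h 1).map (fun r => (PySem.List.pyRange 0 w 1).map (fun c => pvCell data r c)))
    ++ ((PySem.List.pyRange 0 w 1).map (fun c => (PySem.List.pyRange 0 h 1).map (fun r => pvCell data r c)))
    ++ ((PySem.List.pyRange (-(h - 1)) w 1).map (fun d =>
          ((PySem.List.pyRange 0 h 1).filter (fun r => decide (0 ≤ r + d ∧ r + d < w))).map (fun r => pvCell data r (r + d))))
    ++ ((PySem.List.pyRange 0 (h + w - 1) 1).map (fun s =>
          ((PySem.List.pyRange 0 h 1).filter (fun r => decide (0 ≤ s - r ∧ s - r < w))).map (fun r => pvCell data r (s - r))))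
  -- one generic sliding-window product pass per line
  lines.foldl (fun best line =>
    (PySem.List.pyRange 0 ((line.length : Int) - length + 1) 1).foldl (fun best i =>
      max best ((PySem.List.pyRange i (i + length) 1).foldl (fun p j => p * PySem.List.pyGetD line j 0) 1)) best) 1

-- ===== PRECONDITION & SPEC =====
-- Pre_ excludes empty data (data[0] → IndexError in both programs) and, for positive length,
-- ragged grids with a row shorter than len(data[0]): there A raises IndexError whenever any
-- window is scanned — except that when length fits neither dimension its 1 is an accident of
-- the guards never firing — while B, which materialises every full-width line, always raises.
def Pre_max_product_of (data : List (List Int)) (length : Int) : Prop :=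
  data ≠ [] ∧ (1 ≤ length → ∀ row ∈ data, (data.headD []).length ≤ row.length)
instance (data : List (List Int)) (length : Int) : Decidable (Pre_max_product_of data length) := by
  unfold Pre_max_product_of; infer_instance
def pvWitness_max_product_of : List (List Int) × Int := ([[1, 2], [3, 4]], 2)

def Spec_max_product_of (data : List (List Int)) (length : Int) (out : Int) : Prop := out = max_product_of_alt data length
instance (data : List (List Int)) (length : Int) (out : Int) : Decidable (Spec_max_product_of data length out) := by unfold Spec_max_product_of; infer_instance

-- ===== CLAIM (what is proved, stated in full; the proofs are below) =====
def Claim_equal_max_product_of : Prop := ∀ (data : List (List Int)) (length : Int), Dom_max_product_of data length → Pre_max_product_of data length → Spec_max_product_of data length (max_product_of data length)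

-- ===== LEMMAS AND PROOFS =====

-- the four directed window products (A's inner loops)
def pvPH (data : List (List Int)) (length r c : Int) : Int :=
  (PySem.List.pyRange 0 length 1).foldl (fun p i => p * pvCell data r (c + i)) 1
def pvPV (data : List (List Int)) (length r c : Int) : Int :=
  (PySem.List.pyRange 0 length 1).foldl (fun p i => p * pvCell data (r + i) c) 1
def pvPU (data : List (List Int)) (length r c : Int) : Int :=
  (PySem.List.pyRange 0 length 1).foldl (fun p i => p * pvCell data (r - i) (c + i)) 1
def pvPD (data : List (List Int)) (length r c : Int) : Int :=
  (PySem.List.pyRange 0 length 1).foldl (fun p i => p * pvCell data (r + i) (c + i)) 1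

-- A's per-cell candidate list
def pvCand (data : List (List Int)) (length col row : Int) : List Int :=
  [if col ≤ pvWl data - length then pvPH data length row col else 1,
   if row ≤ (data.length : Int) - length then pvPV data length row col else 1,
   if col ≤ pvWl data - length ∧ length - 1 ≤ row then pvPU data length row col else 1,
   if col ≤ pvWl data - length ∧ row ≤ (data.length : Int) - length then pvPD data length row col else 1]

def pvLA (data : List (List Int)) (length : Int) : List Int :=
  (PySem.List.pyRange 0 (pvWl data) 1).flatMap (fun col =>
    (PySem.List.pyRange 0 (data.length : Int) 1).flatMap (fun row =>
      pvCand data length col row))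

-- B's line list and window products
def pvLines (data : List (List Int)) : List (List Int) :=
  ((PySem.List.pyRange 0 (data.length : Int) 1).map (fun r => (PySem.List.pyRange 0 (pvWl data) 1).map (fun c => pvCell data r c)))
  ++ ((PySem.List.pyRange 0 (pvWl data) 1).map (fun c => (PySem.List.pyRange 0 (data.length : Int) 1).map (fun r => pvCell data r c)))
  ++ ((PySem.List.pyRange (-((data.length : Int) - 1)) (pvWl data) 1).map (fun d =>
        ((PySem.List.pyRange 0 (data.length : Int) 1).filter (fun r => decide (0 ≤ r + d ∧ r + d < pvWl data))).map (fun r => pvCell data r (r + d))))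
  ++ ((PySem.List.pyRange 0 ((data.length : Int) + pvWl data - 1) 1).map (fun s =>
        ((PySem.List.pyRange 0 (data.length : Int) 1).filter (fun r => decide (0 ≤ s - r ∧ s - r < pvWl data))).map (fun r => pvCell data r (s - r))))

def pvWin (line : List Int) (length i : Int) : Int :=
  (PySem.List.pyRange i (i + length) 1).foldl (fun p j => p * PySem.List.pyGetD line j 0) 1

def pvLB (data : List (List Int)) (length : Int) : List Int :=
  (pvLines data).flatMap (fun line =>
    (PySem.List.pyRange 0 ((line.length : Int) - length + 1) 1).map (fun i => pvWin line length i))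

-- flattening a nested max-fold
lemma pvFlat {α : Type} (L : List α) (g : α → List Int) (a : Int) :
    L.foldl (fun acc x => (g x).foldl max acc) a = (L.flatMap g).foldl max a := by
  induction L generalizing a with
  | nil => simp
  | cons x xs ih => simp [List.flatMap_cons, List.foldl_append, ih]

lemma pvFoldCongr {α : Type} (L : List α) (a : Int) (f g : Int → α → Int)
    (h : ∀ acc x, f acc x = g acc x) : L.foldl f a = L.foldl g a := by
  induction L generalizing a with
  | nil => rfl
  | cons x xs ih => simp only [List.foldl_cons, h, ih]

lemma pvA_eq (data : List (List Int)) (length : Int) :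
    max_product_of data length = (pvLA data length).foldl max 1 := by
  dsimp only [max_product_of]
  unfold pvLA
  rw [← pvFlat]
  apply pvFoldCongr
  intro mp col
  rw [← pvFlat]
  apply pvFoldCongr
  intro acc row
  simp only [pvCand, pvPH, pvPV, pvPU, pvPD, List.foldl_cons, List.foldl_nil, max_assoc]

lemma pvB_eq (data : List (List Int)) (length : Int) (hl : 0 < length) :
    max_product_of_alt data length = (pvLB data length).foldl max 1 := by
  dsimp only [max_product_of_alt]
  rw [if_neg (by omega)]
  unfold pvLB pvWin pvLines
  rw [← pvFlat]
  apply pvFoldCongr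
  intro acc line
  rw [List.foldl_map]

lemma pvMaxEq (L M : List Int)
    (h1 : ∀ x ∈ L, x = 1 ∨ x ∈ M) (h2 : ∀ y ∈ M, y = 1 ∨ y ∈ L) :
    L.foldl max 1 = M.foldl max 1 := by
  apply le_antisymm
  · rcases PySem.List.foldl_max_mem L 1 with h | h
    · rw [h]; exact (PySem.List.le_foldl_max M 1).1
    · rcases h1 _ h with h' | h'
      · rw [h']; exact (PySem.List.le_foldl_max M 1).1
      · exact (PySem.List.le_foldl_max M 1).2 _ h'
  · rcases PySem.List.foldl_max_mem M 1 with h | h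
    · rw [h]; exact (PySem.List.le_foldl_max L 1).1
    · rcases h2 _ h with h' | h'
      · rw [h']; exact (PySem.List.le_foldl_max L 1).1
      · exact (PySem.List.le_foldl_max L 1).2 _ h'

-- ---- products in normal form ----
def pvProdR (n : Nat) (f : Nat → Int) : Int := ((List.range n).map f).prod

lemma pvFoldMul {α : Type} (l : List α) (f : α → Int) :
    l.foldl (fun p x => p * f x) 1 = (l.map f).prod := by
  simp [List.prod_eq_foldl, List.foldl_map]

lemma pvPH_prod (data : List (List Int)) (L r c : Int) :
    pvPH data L r c = pvProdR L.toNat (fun k => pvCell data r (c + (k : Int))) := by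
  unfold pvPH pvProdR
  rw [PySem.List.pyRange_one, List.foldl_map, pvFoldMul]
  simp [zero_add, sub_zero]

lemma pvPV_prod (data : List (List Int)) (L r c : Int) :
    pvPV data L r c = pvProdR L.toNat (fun k => pvCell data (r + (k : Int)) c) := by
  unfold pvPV pvProdR
  rw [PySem.List.pyRange_one, List.foldl_map, pvFoldMul]
  simp [zero_add, sub_zero]

lemma pvPU_prod (data : List (List Int)) (L r c : Int) :
    pvPU data L r c = pvProdR L.toNat (fun k => pvCell data (r - (k : Int)) (c + (k : Int))) := by
  unfold pvPU pvProdR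
  rw [PySem.List.pyRange_one, List.foldl_map, pvFoldMul]
  simp [zero_add, sub_zero]

lemma pvPD_prod (data : List (List Int)) (L r c : Int) :
    pvPD data L r c = pvProdR L.toNat (fun k => pvCell data (r + (k : Int)) (c + (k : Int))) := by
  unfold pvPD pvProdR
  rw [PySem.List.pyRange_one, List.foldl_map, pvFoldMul]
  simp [zero_add, sub_zero]

lemma pvRevRange (n : Nat) : (List.range n).reverse = (List.range n).map (fun k => n - 1 - k) := by
  rw [List.range_eq_range', List.reverse_range', ← List.range_eq_range']
  simp

lemma pvProdR_reflect (n : Nat) (f : Nat → Int) :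
    pvProdR n f = pvProdR n (fun k => f (n - 1 - k)) := by
  unfold pvProdR
  conv_lhs => rw [← List.prod_reverse, ← List.map_reverse, pvRevRange, List.map_map]
  rfl

-- reading a cell of a materialised line
lemma pvGetLine (lo hi : Int) (g : Int → Int) (j : Int) (h0 : 0 ≤ j) (hj : j < hi - lo) :
    PySem.List.pyGetD ((PySem.List.pyRange lo hi 1).map g) j 0 = g (lo + j) := by
  have hj' : j.toNat < (hi - lo).toNat := by omega
  have h := PySem.List.pyGetD_map_pyRange_one g lo hi j.toNat 0 hj'
  rwa [Int.toNat_of_nonneg h0] at h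

-- a window of a materialised line is a product over its cells
lemma pvWin_eq (lo hi : Int) (g : Int → Int) (L i : Int)
    (h0 : 0 ≤ i) (hle : i + L ≤ hi - lo) :
    pvWin ((PySem.List.pyRange lo hi 1).map g) L i
      = pvProdR L.toNat (fun k => g (lo + i + (k : Int))) := by
  unfold pvWin
  rw [PySem.List.pyRange_one i (i + L)]
  rw [show i + L - i = L by ring]
  rw [List.foldl_map]
  have hcong := PySem.List.foldl_congr_mem (List.range L.toNat)
      (fun p (k : Nat) => p * PySem.List.pyGetD ((PySem.List.pyRange lo hi 1).map g) (i + (k : Int)) 0)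
      (fun p (k : Nat) => p * g (lo + i + (k : Int))) 1
      (by
        intro acc k hk
        have hk' : k < L.toNat := List.mem_range.mp hk
        dsimp only
        rw [pvGetLine lo hi g (i + (k : Int)) (by omega) (by omega), add_assoc])
  rw [hcong, pvFoldMul]
  rfl

-- the filter of a contiguous range is a contiguous range
lemma pvFilterRange (a b lo hi : Int) :
    (PySem.List.pyRange a b 1).filter (fun r => decide (lo ≤ r ∧ r < hi))
      = PySem.List.pyRange (max a lo) (min b hi) 1 := by
  have key : ∀ (n : Nat) (a : Int), (b - a).toNat = n →
      (PySem.List.pyRange a b 1).filter (fun r => decide (lo ≤ r ∧ r < hi))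
        = PySem.List.pyRange (max a lo) (min b hi) 1 := by
    intro n
    induction n with
    | zero =>
      intro a ha
      rw [PySem.List.pyRange_one_eq_nil (show b ≤ a by omega),
        PySem.List.pyRange_one_eq_nil
          (le_trans (min_le_left _ _) (le_trans (show b ≤ a by omega) (le_max_left _ _)))]
      rfl
    | succ m ih =>
      intro a ha
      have hab : a < b := by omega
      rw [PySem.List.pyRange_one_cons hab, List.filter_cons, ih (a + 1) (by omega)]
      by_cases hlo : lo ≤ a
      · by_cases hhi : a < hi
        · simp only [decide_eq_true_eq, if_pos (And.intro hlo hhi)]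
          rw [max_eq_left hlo, max_eq_left (le_trans hlo (by omega))]
          conv_rhs => rw [PySem.List.pyRange_one_cons (lt_min hab hhi)]
        · simp only [decide_eq_true_eq, if_neg (fun h : lo ≤ a ∧ a < hi => hhi h.2)]
          rw [PySem.List.pyRange_one_eq_nil
              (le_trans (min_le_right _ _) (le_trans (show hi ≤ a + 1 by omega) (le_max_left _ _))),
            PySem.List.pyRange_one_eq_nil
              (le_trans (min_le_right _ _) (le_trans (show hi ≤ a by omega) (le_max_left _ _)))]
      · simp only [decide_eq_true_eq, if_neg (fun h : lo ≤ a ∧ a < hi => hlo h.1)]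
        rw [max_eq_right (show a + 1 ≤ lo by omega), max_eq_right (show a ≤ lo by omega)]
  exact key (b - a).toNat a rfl
-- specialised window lemmas, one per line family (assume 0 < L where needed)
lemma pvWin_row (data : List (List Int)) (L r i : Int) (h0 : 0 ≤ i)
    (hle : i + L ≤ pvWl data) :
    pvWin ((PySem.List.pyRange 0 (pvWl data) 1).map (fun c => pvCell data r c)) L i
      = pvPH data L r i := by
  rw [pvWin_eq 0 (pvWl data) _ L i h0 (by omega), pvPH_prod]
  simp only [zero_add]

lemma pvWin_col (data : List (List Int)) (L c i : Int) (h0 : 0 ≤ i)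
    (hle : i + L ≤ (data.length : Int)) :
    pvWin ((PySem.List.pyRange 0 ((data.length : Int)) 1).map (fun r => pvCell data r c)) L i
      = pvPV data L i c := by
  rw [pvWin_eq 0 ((data.length : Int)) _ L i h0 (by omega), pvPV_prod]
  simp only [zero_add]

lemma pvDiagLine (data : List (List Int)) (d : Int) :
    ((PySem.List.pyRange 0 ((data.length : Int)) 1).filter
        (fun r => decide (0 ≤ r + d ∧ r + d < pvWl data))).map (fun r => pvCell data r (r + d))
      = ((PySem.List.pyRange (max 0 (-d)) (min ((data.length : Int)) (pvWl data - d)) 1).map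
          (fun r => pvCell data r (r + d))) := by
  rw [List.filter_congr (q := fun r => decide (-d ≤ r ∧ r < pvWl data - d))
      (fun r _ => by simp only [decide_eq_decide]; omega),
    pvFilterRange]

lemma pvAntiLine (data : List (List Int)) (s : Int) :
    ((PySem.List.pyRange 0 ((data.length : Int)) 1).filter
        (fun r => decide (0 ≤ s - r ∧ s - r < pvWl data))).map (fun r => pvCell data r (s - r))
      = ((PySem.List.pyRange (max 0 (s - pvWl data + 1)) (min ((data.length : Int)) (s + 1)) 1).map
          (fun r => pvCell data r (s - r))) := by
  rw [List.filter_congr (q := fun r => decide (s - pvWl data + 1 ≤ r ∧ r < s + 1))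
      (fun r _ => by simp only [decide_eq_decide]; omega),
    pvFilterRange]

lemma pvWin_diag (data : List (List Int)) (L d i : Int) (h0 : 0 ≤ i)
    (hle : i + L ≤ min ((data.length : Int)) (pvWl data - d) - max 0 (-d)) :
    pvWin (((PySem.List.pyRange 0 ((data.length : Int)) 1).filter
        (fun r => decide (0 ≤ r + d ∧ r + d < pvWl data))).map (fun r => pvCell data r (r + d))) L i
      = pvPD data L (max 0 (-d) + i) (max 0 (-d) + i + d) := by
  rw [pvDiagLine, pvWin_eq _ _ _ L i h0 hle, pvPD_prod]
  unfold pvProdR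
  congr 1
  apply List.map_congr_left
  intro k _
  rw [show max 0 (-d) + i + (k : Int) + d = max 0 (-d) + i + d + (k : Int) by ring]

lemma pvWin_anti (data : List (List Int)) (L s i : Int) (h0 : 0 ≤ i) (hL : 0 < L)
    (hle : i + L ≤ min ((data.length : Int)) (s + 1) - max 0 (s - pvWl data + 1)) :
    pvWin (((PySem.List.pyRange 0 ((data.length : Int)) 1).filter
        (fun r => decide (0 ≤ s - r ∧ s - r < pvWl data))).map (fun r => pvCell data r (s - r))) L i
      = pvPU data L (max 0 (s - pvWl data + 1) + i + L - 1)
          (s - (max 0 (s - pvWl data + 1) + i + L - 1)) := by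
  rw [pvAntiLine, pvWin_eq _ _ _ L i h0 hle, pvPU_prod, pvProdR_reflect L.toNat]
  unfold pvProdR
  congr 1
  apply List.map_congr_left
  intro k hk
  have hk' : k < L.toNat := List.mem_range.mp hk
  have hc : ((L.toNat - 1 - k : Nat) : Int) = L - 1 - (k : Int) := by omega
  rw [hc]
  rw [show max 0 (s - pvWl data + 1) + i + (L - 1 - (k : Int))
      = max 0 (s - pvWl data + 1) + i + L - 1 - (k : Int) by ring]
  rw [show s - (max 0 (s - pvWl data + 1) + i + L - 1 - (k : Int))
      = s - (max 0 (s - pvWl data + 1) + i + L - 1) + (k : Int) by ring]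

-- line lengths
lemma pvLenMapRange (a b : Int) (g : Int → Int) :
    ((((PySem.List.pyRange a b 1).map g).length : Nat) : Int) = (((b - a).toNat : Nat) : Int) := by
  simp [PySem.List.length_pyRange_one]

-- membership in A's candidate flattening
lemma pvMemLA (data : List (List Int)) (L col row x : Int)
    (hc : 0 ≤ col ∧ col < pvWl data) (hr : 0 ≤ row ∧ row < (data.length : Int))
    (he : x ∈ pvCand data L col row) : x ∈ pvLA data L := by
  simp only [pvLA, List.mem_flatMap, PySem.List.mem_pyRange_one]
  exact ⟨col, hc, row, hr, he⟩

lemma pvCand_PH (data : List (List Int)) (L col row : Int) (hg : col ≤ pvWl data - L) :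
    pvPH data L row col ∈ pvCand data L col row := by
  simp [pvCand, if_pos hg]
lemma pvCand_PV (data : List (List Int)) (L col row : Int) (hg : row ≤ (data.length : Int) - L) :
    pvPV data L row col ∈ pvCand data L col row := by
  simp [pvCand, if_pos hg]
lemma pvCand_PU (data : List (List Int)) (L col row : Int)
    (hg1 : col ≤ pvWl data - L) (hg2 : L - 1 ≤ row) :
    pvPU data L row col ∈ pvCand data L col row := by
  simp only [pvCand, List.mem_cons]
  refine Or.inr (Or.inr (Or.inl ?_))
  rw [if_pos ⟨hg1, hg2⟩]
lemma pvCand_PD (data : List (List Int)) (L col row : Int)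
    (hg1 : col ≤ pvWl data - L) (hg2 : row ≤ (data.length : Int) - L) :
    pvPD data L row col ∈ pvCand data L col row := by
  simp only [pvCand, List.mem_cons]
  refine Or.inr (Or.inr (Or.inr (Or.inl ?_)))
  rw [if_pos ⟨hg1, hg2⟩]

-- every window value of B is a guarded candidate of A (positive window length)
lemma pvLB_sub (data : List (List Int)) (L : Int) (hL : 0 < L) :
    ∀ y ∈ pvLB data L, y = 1 ∨ y ∈ pvLA data L := by
  intro y hy
  right
  have hw0 : (0 : Int) ≤ pvWl data := Int.natCast_nonneg _
  have hh0 : (0 : Int) ≤ (data.length : Int) := Int.natCast_nonneg _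
  simp only [pvLB, List.mem_flatMap, List.mem_map, PySem.List.mem_pyRange_one] at hy
  obtain ⟨line, hline, i, ⟨hi0, hi1⟩, hy⟩ := hy
  simp only [pvLines, List.mem_append, List.mem_map, PySem.List.mem_pyRange_one] at hline
  rcases hline with ((⟨r, hr, rfl⟩ | ⟨c, hc, rfl⟩) | ⟨d, hd, rfl⟩) | ⟨s, hs, rfl⟩
  · rw [pvLenMapRange] at hi1
    have hiw : i + L ≤ pvWl data := by omega
    rw [← hy, pvWin_row data L r i hi0 hiw]
    exact pvMemLA data L i r _ ⟨hi0, by omega⟩ hr (pvCand_PH data L i r (by omega))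
  · rw [pvLenMapRange] at hi1
    have hih : i + L ≤ (data.length : Int) := by omega
    rw [← hy, pvWin_col data L c i hi0 hih]
    exact pvMemLA data L c i _ hc ⟨hi0, by omega⟩ (pvCand_PV data L c i (by omega))
  · rw [pvDiagLine, pvLenMapRange] at hi1
    have hle : i + L ≤ min ((data.length : Int)) (pvWl data - d) - max 0 (-d) := by omega
    rw [← hy, pvWin_diag data L d i hi0 hle]
    refine pvMemLA data L (max 0 (-d) + i + d) (max 0 (-d) + i) _ ⟨by omega, by omega⟩
      ⟨by omega, by omega⟩ (pvCand_PD data L _ _ (by omega) (by omega))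
  · rw [pvAntiLine, pvLenMapRange] at hi1
    have hle : i + L ≤ min ((data.length : Int)) (s + 1) - max 0 (s - pvWl data + 1) := by omega
    rw [← hy, pvWin_anti data L s i hi0 hL hle]
    refine pvMemLA data L (s - (max 0 (s - pvWl data + 1) + i + L - 1))
      (max 0 (s - pvWl data + 1) + i + L - 1) _ ⟨by omega, by omega⟩ ⟨by omega, by omega⟩
      (pvCand_PU data L _ _ (by omega) (by omega))

-- membership in B's window flattening, one constructor per line family
lemma pvMemLB (data : List (List Int)) (L : Int) (line : List Int) (i : Int)
    (hline : line ∈ pvLines data) (hi : 0 ≤ i ∧ i < ((line.length : Nat) : Int) - L + 1) :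
    pvWin line L i ∈ pvLB data L := by
  simp only [pvLB, List.mem_flatMap, List.mem_map, PySem.List.mem_pyRange_one]
  exact ⟨line, hline, i, hi, rfl⟩

-- every guarded candidate of A is a window value of B (positive window length)
lemma pvLA_sub (data : List (List Int)) (L : Int) (hL : 0 < L) :
    ∀ x ∈ pvLA data L, x = 1 ∨ x ∈ pvLB data L := by
  intro x hx
  have hw0 : (0 : Int) ≤ pvWl data := Int.natCast_nonneg _
  have hh0 : (0 : Int) ≤ (data.length : Int) := Int.natCast_nonneg _
  simp only [pvLA, List.mem_flatMap, PySem.List.mem_pyRange_one] at hx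
  obtain ⟨col, ⟨hc0, hcw⟩, row, ⟨hr0, hrh⟩, hx⟩ := hx
  simp only [pvCand, List.mem_cons, List.not_mem_nil, or_false] at hx
  rcases hx with h | h | h | h
  · split_ifs at h with hg
    · right
      subst h
      rw [← pvWin_row data L row col hc0 (by omega)]
      refine pvMemLB data L _ col ?_ ⟨hc0, by rw [pvLenMapRange]; omega⟩
      simp only [pvLines, List.mem_append, List.mem_map, PySem.List.mem_pyRange_one]
      exact Or.inl (Or.inl (Or.inl ⟨row, ⟨hr0, hrh⟩, rfl⟩))
    · exact Or.inl h
  · split_ifs at h with hg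
    · right
      subst h
      rw [← pvWin_col data L col row hr0 (by omega)]
      refine pvMemLB data L _ row ?_ ⟨hr0, by rw [pvLenMapRange]; omega⟩
      simp only [pvLines, List.mem_append, List.mem_map, PySem.List.mem_pyRange_one]
      exact Or.inl (Or.inl (Or.inr ⟨col, ⟨hc0, hcw⟩, rfl⟩))
    · exact Or.inl h
  · -- up-right: anti-diagonal s = row + col, start index i = row - L + 1 - lo
    split_ifs at h with hg
    · right
      subst h
      have key := pvWin_anti data L (row + col) (row - L + 1 - max 0 (row + col - pvWl data + 1))
        (by omega) hL (by omega)
      rw [show max 0 (row + col - pvWl data + 1) + (row - L + 1 - max 0 (row + col - pvWl data + 1)) + L - 1 = row by ring] at key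
      rw [show row + col - row = col by ring] at key
      rw [← key]
      refine pvMemLB data L _ _ ?_ ⟨by omega, ?_⟩
      · simp only [pvLines, List.mem_append, List.mem_map, PySem.List.mem_pyRange_one]
        exact Or.inr ⟨row + col, ⟨by omega, by omega⟩, rfl⟩
      · rw [pvAntiLine, pvLenMapRange]; omega
    · exact Or.inl h
  · -- down-right: diagonal d = col - row, start index i = row - lo
    split_ifs at h with hg
    · right
      subst h
      have key := pvWin_diag data L (col - row) (row - max 0 (-(col - row)))
        (by omega) (by omega)
      rw [show max 0 (-(col - row)) + (row - max 0 (-(col - row))) = row by ring] at key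
      rw [show row + (col - row) = col by ring] at key
      rw [← key]
      refine pvMemLB data L _ _ ?_ ⟨by omega, ?_⟩
      · simp only [pvLines, List.mem_append, List.mem_map, PySem.List.mem_pyRange_one]
        exact Or.inl (Or.inr ⟨col - row, ⟨by omega, by omega⟩, rfl⟩)
      · rw [pvDiagLine, pvLenMapRange]; omega
    · exact Or.inl h

-- degenerate window length: every candidate of A is 1
lemma pvPH_nonpos (data : List (List Int)) (L r c : Int) (hl : L ≤ 0) :
    pvPH data L r c = 1 := by
  unfold pvPH; rw [PySem.List.pyRange_one_eq_nil (by omega)]; rfl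
lemma pvPV_nonpos (data : List (List Int)) (L r c : Int) (hl : L ≤ 0) :
    pvPV data L r c = 1 := by
  unfold pvPV; rw [PySem.List.pyRange_one_eq_nil (by omega)]; rfl
lemma pvPU_nonpos (data : List (List Int)) (L r c : Int) (hl : L ≤ 0) :
    pvPU data L r c = 1 := by
  unfold pvPU; rw [PySem.List.pyRange_one_eq_nil (by omega)]; rfl
lemma pvPD_nonpos (data : List (List Int)) (L r c : Int) (hl : L ≤ 0) :
    pvPD data L r c = 1 := by
  unfold pvPD; rw [PySem.List.pyRange_one_eq_nil (by omega)]; rfl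

lemma pvLA_one (data : List (List Int)) (L : Int) (hl : L ≤ 0) :
    ∀ x ∈ pvLA data L, x = 1 := by
  intro x hx
  simp only [pvLA, List.mem_flatMap, PySem.List.mem_pyRange_one] at hx
  obtain ⟨col, _, row, _, hx⟩ := hx
  simp only [pvCand, List.mem_cons, List.not_mem_nil, or_false] at hx
  rcases hx with h | h | h | h <;> rw [h] <;> split_ifs
  · exact pvPH_nonpos data L row col hl
  · rfl
  · exact pvPV_nonpos data L row col hl
  · rfl
  · exact pvPU_nonpos data L row col hl
  · rfl
  · exact pvPD_nonpos data L row col hl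
  · rfl

-- ===== VERDICT (by name: the statement is the Claim_ definition above) =====
theorem max_product_of_spec : Claim_equal_max_product_of := by
  intro data length _ _
  unfold Spec_max_product_of
  by_cases hl : 0 < length
  · rw [pvA_eq, pvB_eq data length hl]
    exact pvMaxEq _ _ (pvLA_sub data length hl) (pvLB_sub data length hl)
  · have hA : max_product_of data length = 1 := by
      rw [pvA_eq]
      have h1 := pvMaxEq (pvLA data length) []
        (fun x hx => Or.inl (pvLA_one data length (by omega) x hx))
        (fun y hy => absurd hy (by simp))
      simpa using h1
    have hB : max_product_of_alt data length = 1 := by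
      dsimp only [max_product_of_alt]
      rw [if_pos (by omega)]
    rw [hA, hB]
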